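-- pv_equiv track=rewrite | github.com/SerjVankovich/ProjectEulerSolutions | problem51.py | equal_mask
-- ===== SOURCE A (Python) =====
-- def equal_mask(num, mask):
--     num_str = str(num)
--     num_star = None
--     if len(num_str) != len(mask):
--         return False
--     for i in range(len(mask)):
--         if mask[i] == '*':
--             if num_star is None:
--                 num_star = num_str[i]
--             else:
--                 if num_star != num_str[i]:
--                     return False
--             continue
--         elif mask[i] == num_str[i]:
--             continue
--         else:
--             return False
--     return True
-- ===== SOURCE B (Python) =====
-- def equal_mask(num, mask):
--     # Guess-and-substitute: the mask matches num iff substituting some single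
--     # character c (necessarily a character of str(num)) for every '*' in the
--     # mask yields exactly str(num).  No length guard, no positional scan state.
--     num_str = str(num)
--     return any(num_str == ''.join(c if m == '*' else m for m in mask)
--                for c in num_str)
-- ===== Notes on version B (the rewrite author's own statement) =====
-- stated objective: alternative
-- what changed: Replaces A's single stateful positional scan (running num_star sentinel, early returns, explicit length guard) with a guess-and-substitute search: for each candidate character c of str(num), substitute c for every '*' in the mask and compare the whole substituted string against str(num); the length guard disappears because substitution preserves length.
import Mathlib
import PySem

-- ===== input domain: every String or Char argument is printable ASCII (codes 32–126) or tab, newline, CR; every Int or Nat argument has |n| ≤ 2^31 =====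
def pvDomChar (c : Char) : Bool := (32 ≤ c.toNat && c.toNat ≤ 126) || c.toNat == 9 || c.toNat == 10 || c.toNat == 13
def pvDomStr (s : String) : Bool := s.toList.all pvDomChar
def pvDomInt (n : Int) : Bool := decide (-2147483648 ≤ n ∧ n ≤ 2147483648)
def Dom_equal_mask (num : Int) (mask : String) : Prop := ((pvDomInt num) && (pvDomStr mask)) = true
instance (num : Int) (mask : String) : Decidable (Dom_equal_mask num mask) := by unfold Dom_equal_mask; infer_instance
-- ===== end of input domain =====

-- B replaces A's single stateful positional scan (running num_star sentinel, early returns,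
-- explicit length guard) by a guess-and-substitute search: for each candidate character c of
-- str(num), substitute c for every '*' in the mask and compare whole strings (objective: alternative).

-- ===== PORT A =====
-- A's `for i in range(len(mask))` loop with the running `num_star` state and early returns.
def eqmLoop (ns ms : List Char) (i : Nat) (star : Option Char) : Bool :=
  if _h : i < ms.length then
    if ms.getD i ' ' = '*' then
      match star with
      | none => eqmLoop ns ms (i + 1) (some (ns.getD i ' '))
      | some c => if c ≠ ns.getD i ' ' then false else eqmLoop ns ms (i + 1) (some c)
    else if ms.getD i ' ' = ns.getD i ' ' then eqmLoop ns ms (i + 1) star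
    else false
  else true
termination_by ms.length - i

def equal_mask (num : Int) (mask : String) : Bool :=
  let ns := (PySem.Int.toStr num).toList
  let ms := mask.toList
  if ns.length ≠ ms.length then false
  else eqmLoop ns ms 0 none

-- ===== PORT B =====
def equal_mask_alt (num : Int) (mask : String) : Bool :=
  let ns := (PySem.Int.toStr num).toList
  let ms := mask.toList
  -- any(num_str == ''.join(c if m == '*' else m for m in mask) for c in num_str)
  ns.any (fun c => ns == ms.map (fun m => if m = '*' then c else m))

-- ===== PRECONDITION & SPEC =====
def Spec_equal_mask (num : Int) (mask : String) (out : Bool) : Prop := out = equal_mask_alt num mask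
instance (num : Int) (mask : String) (out : Bool) : Decidable (Spec_equal_mask num mask out) := by unfold Spec_equal_mask; infer_instance

-- ===== CLAIM (what is proved, stated in full; the proofs are below) =====
def Claim_equal_equal_mask : Prop := ∀ (num : Int) (mask : String), Dom_equal_mask num mask → Spec_equal_mask num mask (equal_mask num mask)

-- ===== LEMMAS AND PROOFS =====

-- A's loop rephrased structurally over the list of (mask char, digit) pairs.
def eqmPairs (l : List (Char × Char)) (star : Option Char) : Bool :=
  match l with
  | [] => true
  | (m, d) :: t =>
    if m = '*' then
      match star with
      | none => eqmPairs t (some d)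
      | some c => if c ≠ d then false else eqmPairs t (some c)
    else if m = d then eqmPairs t star else false

def starsOf (l : List (Char × Char)) : List Char :=
  l.filterMap (fun p => if p.1 = '*' then some p.2 else none)

def fixedAll (l : List (Char × Char)) : Bool :=
  (l.filter (fun p => p.1 ≠ '*')).all (fun p => p.1 == p.2)

def starCond : Option Char → List Char → Bool
  | none, [] => true
  | none, d :: r => r.all (· == d)
  | some c, ds => ds.all (· == c)

lemma eqmLoop_eq_pairs (ns ms : List Char) (h : ns.length = ms.length) :
    ∀ i star, eqmLoop ns ms i star = eqmPairs ((ms.zip ns).drop i) star := by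
  intro i star
  induction hi : ms.length - i using Nat.strong_induction_on generalizing i star with
  | _ n IH =>
    rw [eqmLoop.eq_def]
    by_cases hlt : i < ms.length
    · have hz : (ms.zip ns).drop i = (ms[i]!, ns[i]!) :: (ms.zip ns).drop (i + 1) := by
        have hzl : i < (ms.zip ns).length := by simp [List.length_zip, h]; omega
        rw [List.drop_eq_getElem_cons hzl]
        congr 1
        have hns : i < ns.length := by omega
        simp [List.getElem_zip, hlt, hns]
      have hgm : ms.getD i ' ' = ms[i]! := by
        simp [List.getD, List.getElem!_eq_getElem?_getD, List.getElem?_eq_getElem hlt]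
      have hgn : ns.getD i ' ' = ns[i]! := by
        have hns : i < ns.length := by omega
        simp [List.getD, List.getElem!_eq_getElem?_getD, List.getElem?_eq_getElem hns]
      have hrec : ∀ st, eqmLoop ns ms (i + 1) st = eqmPairs ((ms.zip ns).drop (i + 1)) st := by
        intro st
        exact IH (ms.length - (i + 1)) (by omega) (i + 1) st rfl
      simp only [hlt, dif_pos, hgm, hgn, hz, eqmPairs]
      by_cases hstar : ms[i]! = '*'
      · cases star with
        | none => simp [hstar, hrec]
        | some c => by_cases hc : c = ns[i]! <;> simp [hstar, hc, hrec]
      · by_cases hd : ms[i]! = ns[i]! <;> simp [hd, hrec]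
    · have : (ms.zip ns).drop i = [] := by
        apply List.drop_eq_nil_of_le
        simp [List.length_zip]; omega
      simp [hlt, this, eqmPairs]

lemma eqmPairs_char (l : List (Char × Char)) :
    ∀ star, eqmPairs l star = (fixedAll l && starCond star (starsOf l)) := by
  induction l with
  | nil => intro star; cases star <;> simp [eqmPairs, fixedAll, starsOf, starCond]
  | cons p t IH =>
    intro star
    obtain ⟨m, d⟩ := p
    by_cases hm : m = '*'
    · cases star with
      | none =>
        simp [eqmPairs, hm, IH, fixedAll, starsOf, starCond]
      | some c =>
        by_cases hc : c = d
        · subst hc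
          simp [eqmPairs, hm, IH, fixedAll, starsOf, starCond]
        · simp [eqmPairs, hm, hc, fixedAll, starsOf, starCond, Ne.symm hc]
    · by_cases hd : m = d
      · subst hd
        simp [eqmPairs, hm, IH, fixedAll, starsOf, starCond]
      · cases star <;> simp [eqmPairs, hm, hd, fixedAll, starsOf]

lemma beq_swap (a b : Char) : (a == b) = (b == a) := by
  by_cases h : a = b <;> simp [h, eq_comm]

-- B's substituted-string comparison, pointwise.
lemma map_sub_eq (ms : List Char) (c : Char) :
    ∀ ns : List Char,
      (ns == ms.map (fun m => if m = '*' then c else m)) =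
        (decide (ns.length = ms.length) &&
          (ms.zip ns).all (fun p => (if p.1 = '*' then c else p.1) == p.2)) := by
  induction ms with
  | nil => intro ns; cases ns <;> simp
  | cons m t IH =>
    intro ns
    cases ns with
    | nil => simp
    | cons d r =>
      simp only [List.map_cons, List.zip_cons_cons, List.all_cons, List.length_cons,
        List.cons_beq_cons, IH r]
      have hlen : (decide (r.length + 1 = t.length + 1)) = decide (r.length = t.length) := by
        simp
      rw [beq_swap d, Bool.and_left_comm]
      congr 1
      simp

lemma all_sub_split (c : Char) :
    ∀ l : List (Char × Char),
      (l.all (fun p => (if p.1 = '*' then c else p.1) == p.2)) =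
        (fixedAll l && (starsOf l).all (· == c)) := by
  intro l
  induction l with
  | nil => simp [fixedAll, starsOf]
  | cons p t IH =>
    obtain ⟨m, d⟩ := p
    by_cases hm : m = '*'
    · simp [hm, fixedAll, starsOf, IH, beq_swap c, Bool.and_left_comm]
    · simp [hm, fixedAll, starsOf, IH, Bool.and_assoc]

lemma stars_mem (ms ns : List Char) :
    ∀ d ∈ starsOf (ms.zip ns), d ∈ ns := by
  intro d hd
  simp only [starsOf, List.mem_filterMap] at hd
  obtain ⟨⟨m, d'⟩, hmem, hif⟩ := hd
  have : d' = d := by by_cases h : m = '*' <;> simp [h] at hif; exact hif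
  subst this
  exact (List.of_mem_zip hmem).2

lemma any_starCond (ns stars : List Char) (hne : ns ≠ [])
    (hsub : ∀ d ∈ stars, d ∈ ns) :
    ns.any (fun c => stars.all (· == c)) = starCond none stars := by
  cases stars with
  | nil =>
    cases ns with
    | nil => exact absurd rfl hne
    | cons a r => simp [starCond]
  | cons d r =>
    simp only [starCond]
    cases hall : r.all (· == d) with
    | true =>
      have hd : d ∈ ns := hsub d (by simp)
      rw [List.any_eq_true]
      exact ⟨d, hd, by simp [hall]⟩
    | false =>
      rw [List.any_eq_false]
      intro c hc
      simp only [List.all_cons, Bool.and_eq_true, beq_iff_eq, not_and]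
      intro hdc
      subst hdc
      simp [hall]

lemma toDigitsCore_length_le (b : Nat) :
    ∀ (fuel n : Nat) (ds : List Char), ds.length ≤ (Nat.toDigitsCore b fuel n ds).length := by
  intro fuel
  induction fuel with
  | zero => intro n ds; simp [Nat.toDigitsCore]
  | succ f IH =>
    intro n ds
    simp only [Nat.toDigitsCore]
    split
    · simp
    · exact le_trans (by simp) (IH _ _)

lemma toChars_ne_nil (n : Int) : PySem.Int.toChars n ≠ [] := by
  have hdig : ∀ m : Nat, Nat.toDigits 10 m ≠ [] := by
    intro m hcon
    unfold Nat.toDigits at hcon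
    simp only [Nat.toDigitsCore] at hcon
    by_cases h0 : m / 10 = 0
    · simp [h0] at hcon
    · rw [if_neg h0] at hcon
      have := toDigitsCore_length_le 10 m (m / 10) [Nat.digitChar (m % 10)]
      rw [hcon] at this
      simp at this
  unfold PySem.Int.toChars
  split
  · simp
  · exact hdig _

-- ===== VERDICT (by name: the statement is the Claim_ definition above) =====
theorem equal_mask_spec : Claim_equal_equal_mask := by
  intro num mask _
  unfold Spec_equal_mask equal_mask equal_mask_alt
  set ns := (PySem.Int.toStr num).toList with hns
  set ms := mask.toList with hms
  have hne : ns ≠ [] := by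
    rw [hns, PySem.Int.toList_toStr]
    exact toChars_ne_nil num
  have hB : ∀ c, (ns == ms.map (fun m => if m = '*' then c else m)) =
      (decide (ns.length = ms.length) && (fixedAll (ms.zip ns) && (starsOf (ms.zip ns)).all (· == c))) := by
    intro c
    rw [map_sub_eq, all_sub_split]
  by_cases hlen : ns.length = ms.length
  · simp only [hlen, ne_eq, not_true_eq_false, if_false]
    rw [eqmLoop_eq_pairs ns ms hlen 0 none, List.drop_zero, eqmPairs_char]
    have hpt : ∀ c, (ns == ms.map (fun m => if m = '*' then c else m)) =
        (fixedAll (ms.zip ns) && (starsOf (ms.zip ns)).all (· == c)) := by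
      intro c
      rw [hB c]
      simp [hlen]
    simp only [hpt]
    cases hfix : fixedAll (ms.zip ns) with
    | false => simp
    | true =>
      simp only [Bool.true_and]
      exact (any_starCond ns (starsOf (ms.zip ns)) hne (stars_mem ms ns)).symm
  · simp only [ne_eq, hlen, not_false_eq_true, if_true]
    symm
    rw [List.any_eq_false]
    intro c _
    rw [hB c]
    simp [hlen]
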